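-- pv_equiv track=rewrite | github.com/StateFromJakeFarm/compProgramming | Hired/binary_tree_left_or_right_bigger.py | solution
-- ===== SOURCE A (Python) =====
-- from math import ceil, log2
--
-- def solution(arr):
--     '''
--     Array represents binary tree line-by-line; -1 is nonexistant node.
--     Is left or right subtree larger?
--     '''
--     if len(arr) == 0:
--         return ''
--
--     left = 0
--     right = 0
--
--     start = 1
--     for level in range(1, ceil(log2(len(arr)))):
--         width = 2 ** level
--         for i in range(width):
--             if start+i >= len(arr):
--                 # Reached end of tree
--                 break
--
--             if arr[start+i] == -1:
--                 # Nonexistant node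
--                 continue
--
--             if i < width//2:
--                 left += arr[start+i]
--             else:
--                 right += arr[start+i]
--
--         start += width
--
--     if left == right:
--         return ''
--
--     return 'Left' if left > right else 'Right'
-- ===== SOURCE B (Python) =====
-- def solution(arr):
--     '''
--     Array represents binary tree line-by-line; -1 is nonexistant node.
--     Is left or right subtree larger?
--     '''
--     if not arr:
--         return ''
--     left = right = 0
--     for i in range(1, len(arr)):
--         v = arr[i]
--         if v == -1:
--             continue
--         # node i (1-based label i+1) sits in the left subtree iff the bit
--         # just below the label's top bit is 0, i.e. the top two bits are '10'
--         if (i + 1) >> ((i + 1).bit_length() - 2) == 2: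
--             left += v
--         else:
--             right += v
--     if left == right:
--         return ''
--     return 'Left' if left > right else 'Right'
-- ===== Notes on version B (the rewrite author's own statement) =====
-- stated objective: simpler
-- what changed: Replaces A's nested level/width loops (running start offset, per-level break at the array end) by one flat loop over all node indices that reads each node's subtree directly from the top two bits of its 1-based label.
-- intended difference: On arrays whose length n is an exact power of two (n >= 2) whose last entry is a real nonzero node (arr[n-1] not in {-1,0}), A's level loop range(1, ceil(log2(n))) stops before the final node and silently omits arr[n-1] from the subtree sums, so A returns the verdict of the truncated tree while B returns the comparison over the whole tree, which is the intended value. — e.g. on solution([0, 5]): A returns "", B returns "Left"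
import Mathlib
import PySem

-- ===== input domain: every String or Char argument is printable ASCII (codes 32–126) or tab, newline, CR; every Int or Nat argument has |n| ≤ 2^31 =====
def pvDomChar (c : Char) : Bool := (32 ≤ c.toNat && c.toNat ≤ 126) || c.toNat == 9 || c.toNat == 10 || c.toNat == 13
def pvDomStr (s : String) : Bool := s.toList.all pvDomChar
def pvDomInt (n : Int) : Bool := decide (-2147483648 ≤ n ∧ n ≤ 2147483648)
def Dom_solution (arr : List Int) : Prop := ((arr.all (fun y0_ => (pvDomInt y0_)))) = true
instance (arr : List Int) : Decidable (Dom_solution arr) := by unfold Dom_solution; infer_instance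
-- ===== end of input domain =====

-- B replaces A's nested level/width loops by one flat loop over all node indices, classifying each
-- node into the left/right subtree from the top two bits of its 1-based label (objective: simpler).
-- On power-of-two lengths A omits the last node; that is stated as an intended difference (D_ below).

-- ===== PORT A =====
-- inner 'for i in range(width)' with break/continue; state (left, right).
-- ceil(log2(len(arr))) is ported exactly as Nat.clog 2 (exact value of A's float expression on all feasible list lengths).
def innerA (arr : List Int) (start width : Nat) : List Nat → Int × Int → Int × Int
  | [], lr => lr
  | i :: rest, (l, r) =>
    if start + i ≥ arr.length then (l, r)              -- break: reached end of tree
    else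
      let v := arr.getD (start + i) 0                  -- arr[start+i], in range here
      if v = -1 then innerA arr start width rest (l, r)  -- continue
      else if i < width / 2 then innerA arr start width rest (l + v, r)
      else innerA arr start width rest (l, r + v)

def solution (arr : List Int) : String :=
  if arr.length = 0 then ""
  else
    let st :=
      (List.range' 1 (Nat.clog 2 arr.length - 1)).foldl
        (fun (st : Int × Int × Nat) (level : Nat) =>
          let width := 2 ^ level
          let lr := innerA arr st.2.2 width (List.range width) (st.1, st.2.1)
          (lr.1, lr.2, st.2.2 + width))
        (0, 0, 1)
    if st.1 = st.2.1 then ""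
    else if st.1 > st.2.1 then "Left" else "Right"

-- ===== PORT B =====
-- (k).bit_length() is ported as Nat.size k; '>>' is Nat shiftRight.
def stepB (arr : List Int) (lr : Int × Int) (i : Nat) : Int × Int :=
  let v := arr.getD i 0
  if v = -1 then lr
  else if (i + 1) >>> (Nat.size (i + 1) - 2) == 2 then (lr.1 + v, lr.2) else (lr.1, lr.2 + v)

def solution_alt (arr : List Int) : String :=
  if arr = [] then ""
  else
    let lr := (List.range' 1 (arr.length - 1)).foldl (stepB arr) (0, 0)
    if lr.1 = lr.2 then ""
    else if lr.1 > lr.2 then "Left" else "Right"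

-- ===== PRECONDITION & SPEC =====
-- On arrays whose length n is an exact power of two (n ≥ 2), A's level loop range(1, ceil(log2(n)))
-- stops before the final node, silently omitting arr[n-1] from the sums; D_ names those arrays whose
-- omitted last entry is a real node with a nonzero value, and there B's whole-tree comparison is the
-- intended value.
def D_solution (arr : List Int) : Prop :=
  2 ≤ arr.length ∧ arr.length = 2 ^ Nat.size (arr.length - 1) ∧
    arr.getD (arr.length - 1) 0 ≠ -1 ∧ arr.getD (arr.length - 1) 0 ≠ 0
instance (arr : List Int) : Decidable (D_solution arr) := by unfold D_solution; infer_instance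

def Spec_solution (arr : List Int) (out : String) : Prop := ¬ D_solution arr → out = solution_alt arr
instance (arr : List Int) (out : String) : Decidable (Spec_solution arr out) := by unfold Spec_solution; infer_instance

def pvDiffWitness_solution : List Int := ([0, 5])
def pvDiffWitnessOut_solution : String × String := ("", "Left")

-- ===== CLAIM (what is proved, stated in full; the proofs are below) =====
def Claim_unchanged_solution : Prop := ∀ (arr : List Int), Dom_solution arr → Spec_solution arr (solution arr)
def Claim_changed_solution : Prop := Dom_solution (pvDiffWitness_solution) ∧ D_solution (pvDiffWitness_solution) ∧ solution (pvDiffWitness_solution) = pvDiffWitnessOut_solution.1 ∧ solution_alt (pvDiffWitness_solution) = pvDiffWitnessOut_solution.2 ∧ pvDiffWitnessOut_solution.1 ≠ pvDiffWitnessOut_solution.2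

-- ===== LEMMAS AND PROOFS =====

-- proof-side vocabulary: which subtree a node index belongs to, the per-side sums, and the verdict
-- node at array index i lies in the LEFT subtree iff the top two bits of its 1-based label i+1 are '10'
def isLeft (i : Nat) : Bool := (i + 1) >>> (Nat.size (i + 1) - 2) == 2

def sideSum (arr : List Int) (xs : List Nat) (side : Bool) : Int :=
  ((xs.filter (fun i => isLeft i == side && arr.getD i 0 != -1)).map
    (fun i => arr.getD i 0)).sum

def subSum (arr : List Int) (m : Nat) (side : Bool) : Int :=
  sideSum arr (List.range' 1 m) side

def verdict (l r : Int) : String := if l = r then "" else if l > r then "Left" else "Right"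

-- ceil(log2 n) (= clog) coincides with (n-1).bit_length() (= size) for n ≥ 1.
theorem clog_eq_size (n : Nat) (hn : 1 ≤ n) : Nat.clog 2 n = Nat.size (n - 1) := by
  apply le_antisymm
  · rw [Nat.clog_le_iff_le_pow (by norm_num)]
    have := Nat.lt_size_self (n - 1)
    omega
  · rw [Nat.size_le]
    have := (Nat.clog_le_iff_le_pow (b := 2) (by norm_num) (x := n) (y := Nat.clog 2 n)).mp le_rfl
    omega

theorem size_of_between {k m : Nat} (h1 : 2 ^ k ≤ m) (h2 : m < 2 ^ (k + 1)) :
    Nat.size m = k + 1 := by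
  apply le_antisymm
  · exact (Nat.size_le).mpr h2
  · exact Nat.lt_size.mpr h1

-- the top-two-bits test, evaluated at the i-th node of level ℓ
theorem isLeft_seg (ℓ i : Nat) (hℓ : 1 ≤ ℓ) (hi : i < 2 ^ ℓ) :
    isLeft (2 ^ ℓ - 1 + i) = decide (i < 2 ^ (ℓ - 1)) := by
  obtain ⟨k, rfl⟩ : ∃ k, ℓ = k + 1 := ⟨ℓ - 1, by omega⟩
  have hpow : 1 ≤ 2 ^ (k + 1) := Nat.one_le_two_pow
  have hlab : 2 ^ (k + 1) - 1 + i + 1 = i + 2 * 2 ^ k := by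
    have : 2 ^ (k + 1) = 2 * 2 ^ k := by ring
    omega
  have hsize : Nat.size (2 ^ (k + 1) - 1 + i + 1) = k + 2 := by
    apply size_of_between
    · omega
    · have : 2 ^ (k + 1 + 1) = 2 ^ (k + 1) + 2 ^ (k + 1) := by ring
      omega
  unfold isLeft
  rw [hsize, hlab, show k + 2 - 2 = k from rfl, Nat.shiftRight_eq_div_pow,
    Nat.add_mul_div_right _ _ (Nat.pos_of_ne_zero (by positivity))]
  rcases Nat.lt_or_ge i (2 ^ k) with h | h
  · rw [Nat.div_eq_of_lt h]
    simp [h]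
  · have h2 : i / 2 ^ k = 1 := by
      apply Nat.div_eq_of_lt_le
      · omega
      · have : 2 ^ (k + 1) = 2 * 2 ^ k := by ring
        omega
    rw [h2]
    simp [show ¬ i < 2 ^ k from by omega]

-- the indices of level ℓ that the tree actually contains (truncated at arr.length = n)
def seg (n ℓ : Nat) : List Nat := List.range' (2 ^ ℓ - 1) (min (2 ^ ℓ) (n - (2 ^ ℓ - 1)))

-- inner loop of A over the tail of range (2^ℓ) equals B's flat step over the surviving indices
theorem innerA_eq_stepB (arr : List Int) (ℓ : Nat) (hℓ : 1 ≤ ℓ) :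
    ∀ (c i : Nat), i + c ≤ 2 ^ ℓ → ∀ (lr : Int × Int),
      innerA arr (2 ^ ℓ - 1) (2 ^ ℓ) (List.range' i c) lr
        = (List.range' (2 ^ ℓ - 1 + i) (min c (arr.length - (2 ^ ℓ - 1 + i)))).foldl
            (stepB arr) lr := by
  intro c
  induction c with
  | zero => intro i _ lr; simp [innerA]
  | succ c ih =>
    intro i hic lr
    have hpow : 1 ≤ 2 ^ ℓ := Nat.one_le_two_pow
    rw [List.range'_succ]
    obtain ⟨l, r⟩ := lr
    show innerA arr (2 ^ ℓ - 1) (2 ^ ℓ) (i :: List.range' (i + 1) c) (l, r) = _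
    rw [innerA]
    by_cases hbreak : 2 ^ ℓ - 1 + i ≥ arr.length
    · rw [if_pos hbreak]
      have : min (c + 1) (arr.length - (2 ^ ℓ - 1 + i)) = 0 := by omega
      rw [this]; simp
    · rw [if_neg hbreak]
      have hlen : 2 ^ ℓ - 1 + i < arr.length := by omega
      have hmin : min (c + 1) (arr.length - (2 ^ ℓ - 1 + i))
          = (min c (arr.length - (2 ^ ℓ - 1 + (i + 1)))) + 1 := by omega
      rw [hmin, List.range'_succ, List.foldl_cons]
      have harg : 2 ^ ℓ - 1 + (i + 1) = 2 ^ ℓ - 1 + i + 1 := by omega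
      have hhalf : 2 ^ ℓ / 2 = 2 ^ (ℓ - 1) := by
        obtain ⟨k, rfl⟩ : ∃ k, ℓ = k + 1 := ⟨ℓ - 1, by omega⟩
        simp [pow_succ]
      have hstep : stepB arr (l, r) (2 ^ ℓ - 1 + i)
          = (if arr.getD (2 ^ ℓ - 1 + i) 0 = -1 then (l, r)
             else if i < 2 ^ (ℓ - 1) then (l + arr.getD (2 ^ ℓ - 1 + i) 0, r)
             else (l, r + arr.getD (2 ^ ℓ - 1 + i) 0)) := by
        simp only [stepB]
        rw [show ((2 ^ ℓ - 1 + i + 1) >>> (Nat.size (2 ^ ℓ - 1 + i + 1) - 2) == 2)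
              = isLeft (2 ^ ℓ - 1 + i) from rfl, isLeft_seg ℓ i hℓ (by omega)]
        by_cases hside : i < 2 ^ (ℓ - 1) <;> simp [hside]
      by_cases hv : arr.getD (2 ^ ℓ - 1 + i) 0 = -1
      · rw [if_pos hv, ih (i + 1) (by omega) (l, r), hstep, if_pos hv, harg]
      · rw [if_neg hv, hstep, if_neg hv, hhalf]
        by_cases hside : i < 2 ^ (ℓ - 1)
        · rw [if_pos hside, if_pos hside, ih (i + 1) (by omega) _, harg]
        · rw [if_neg hside, if_neg hside, ih (i + 1) (by omega) _, harg]

-- the outer level loop of A, started at any level a ≥ 1, is B's step folded over the level segments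
theorem outerA_eq (arr : List Int) :
    ∀ (K a : Nat), 1 ≤ a → ∀ (l r : Int),
      (List.range' a K).foldl
        (fun (st : Int × Int × Nat) (level : Nat) =>
          let width := 2 ^ level
          let lr := innerA arr st.2.2 width (List.range width) (st.1, st.2.1)
          (lr.1, lr.2, st.2.2 + width))
        (l, r, 2 ^ a - 1)
      = (let lr := ((List.range' a K).flatMap (seg arr.length)).foldl (stepB arr) (l, r)
         (lr.1, lr.2, 2 ^ (a + K) - 1)) := by
  intro K
  induction K with
  | zero => intro a _ l r; simp
  | succ K ih =>
    intro a ha l r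
    rw [List.range'_succ, List.foldl_cons, List.flatMap_cons, List.foldl_append]
    have hpow : 1 ≤ 2 ^ a := Nat.one_le_two_pow
    have hrange : List.range (2 ^ a) = List.range' 0 (2 ^ a) := by
      rw [List.range_eq_range']
    simp only [hrange]
    rw [innerA_eq_stepB arr a ha (2 ^ a) 0 (by omega) (l, r)]
    have hstart : 2 ^ a - 1 + 2 ^ a = 2 ^ (a + 1) - 1 := by
      have : 2 ^ (a + 1) = 2 ^ a + 2 ^ a := by ring
      omega
    have hseg : List.range' (2 ^ a - 1 + 0) (min (2 ^ a) (arr.length - (2 ^ a - 1 + 0)))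
        = seg arr.length a := by
      simp [seg]
    rw [hseg]
    set lr1 := (seg arr.length a).foldl (stepB arr) (l, r) with hlr1
    show (List.range' (a + 1) K).foldl _ (lr1.1, lr1.2, 2 ^ a - 1 + 2 ^ a) = _
    rw [hstart, ih (a + 1) (by omega) lr1.1 lr1.2]
    have : a + 1 + K = a + (K + 1) := by omega
    simp [this]

-- the level segments concatenate to one flat range
theorem flat_range (n : Nat) (hn : 1 ≤ n) :
    ∀ (k : Nat), (List.range' 1 k).flatMap (seg n) = List.range' 1 (min (n - 1) (2 ^ (k + 1) - 2)) := by
  intro k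
  induction k with
  | zero => simp
  | succ k ih =>
    rw [List.range'_1_concat, List.flatMap_append, ih, List.flatMap_singleton,
        Nat.add_comm 1 k]
    unfold seg
    have hp : 1 ≤ 2 ^ (k + 1) := Nat.one_le_two_pow
    have hp2 : 2 ^ (k + 1 + 1) = 2 ^ (k + 1) + 2 ^ (k + 1) := by ring
    by_cases hcase : n < 2 ^ (k + 1)
    · have h0 : min (2 ^ (k + 1)) (n - (2 ^ (k + 1) - 1)) = 0 := by omega
      have h1 : min (n - 1) (2 ^ (k + 1) - 2) = n - 1 := by omega
      have h2 : min (n - 1) (2 ^ (k + 1 + 1) - 2) = n - 1 := by omega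
      rw [h0, h1, h2]; simp
    · have h1 : min (n - 1) (2 ^ (k + 1) - 2) = 2 ^ (k + 1) - 2 := by omega
      rw [h1, show 2 ^ (k + 1) - 1 = 1 + (2 ^ (k + 1) - 2) from by omega,
        List.range'_append_1]
      congr 1
      omega

-- the flat fold computes exactly the two spec-level side sums
theorem fold_eq_sums_gen (arr : List Int) :
    ∀ (xs : List Nat) (l r : Int),
      xs.foldl (stepB arr) (l, r) = (l + sideSum arr xs true, r + sideSum arr xs false) := by
  intro xs
  induction xs with
  | nil => intro l r; simp [sideSum]
  | cons i xs ih =>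
    intro l r
    rw [List.foldl_cons]
    by_cases hv : arr.getD i 0 = -1
    · have hb : (arr.getD i 0 != -1) = false := bne_eq_false_iff_eq.mpr hv
      have hstep : stepB arr (l, r) i = (l, r) := by
        simp only [stepB]; rw [if_pos hv]
      have hs : ∀ s : Bool, sideSum arr (i :: xs) s = sideSum arr xs s := by
        intro s; unfold sideSum
        rw [List.filter_cons, if_neg (by rw [hb, Bool.and_false]; exact Bool.false_ne_true)]
      rw [hstep, ih, hs, hs]
    · have hb : (arr.getD i 0 != -1) = true := bne_iff_ne.mpr hv
      by_cases hL : isLeft i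
      · have hstep : stepB arr (l, r) i = (l + arr.getD i 0, r) := by
          simp only [stepB]
          rw [show ((i + 1) >>> (Nat.size (i + 1) - 2) == 2) = isLeft i from rfl,
            if_neg hv, if_pos hL]
        have ht : sideSum arr (i :: xs) true = arr.getD i 0 + sideSum arr xs true := by
          unfold sideSum
          rw [List.filter_cons, if_pos (by rw [hb, hL]; rfl), List.map_cons, List.sum_cons]
        have hf : sideSum arr (i :: xs) false = sideSum arr xs false := by
          unfold sideSum
          rw [List.filter_cons, if_neg (by rw [hb, hL]; exact Bool.false_ne_true)]
        rw [hstep, ih, ht, hf, add_assoc]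
      · have hL' : isLeft i = false := Bool.not_eq_true _ ▸ Bool.of_not_eq_true hL
        have hstep : stepB arr (l, r) i = (l, r + arr.getD i 0) := by
          simp only [stepB]
          rw [show ((i + 1) >>> (Nat.size (i + 1) - 2) == 2) = isLeft i from rfl,
            if_neg hv, if_neg hL]
        have ht : sideSum arr (i :: xs) true = sideSum arr xs true := by
          unfold sideSum
          rw [List.filter_cons, if_neg (by rw [hb, hL']; exact Bool.false_ne_true)]
        have hf : sideSum arr (i :: xs) false = arr.getD i 0 + sideSum arr xs false := by
          unfold sideSum
          rw [List.filter_cons, if_pos (by rw [hb, hL']; rfl), List.map_cons, List.sum_cons]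
        rw [hstep, ih, ht, hf, add_assoc]

theorem fold_eq_sums (arr : List Int) (m : Nat) (l r : Int) :
    (List.range' 1 m).foldl (stepB arr) (l, r)
      = (l + subSum arr m true, r + subSum arr m false) := by
  rw [fold_eq_sums_gen]
  rfl

-- A computes the verdict of the side sums truncated at min(n-1, 2^bitlen(n-1) - 2)
theorem solution_char (arr : List Int) (hne : arr ≠ []) :
    solution arr
      = verdict
          (subSum arr (min (arr.length - 1) (2 ^ Nat.size (arr.length - 1) - 2)) true)
          (subSum arr (min (arr.length - 1) (2 ^ Nat.size (arr.length - 1) - 2)) false) := by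
  have hn : 1 ≤ arr.length := by
    cases arr with
    | nil => exact absurd rfl hne
    | cons x xs => simp
  unfold solution
  rw [if_neg (by omega)]
  have houter := outerA_eq arr (Nat.clog 2 arr.length - 1) 1 le_rfl 0 0
  rw [show (2 : Nat) ^ 1 - 1 = 1 from rfl] at houter
  rw [houter, flat_range arr.length hn (Nat.clog 2 arr.length - 1),
    clog_eq_size arr.length hn]
  have hmin : min (arr.length - 1) (2 ^ (Nat.size (arr.length - 1) - 1 + 1) - 2)
      = min (arr.length - 1) (2 ^ Nat.size (arr.length - 1) - 2) := by
    by_cases hs : Nat.size (arr.length - 1) = 0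
    · have hz : arr.length - 1 = 0 := by
        have := Nat.lt_size_self (arr.length - 1)
        rw [hs] at this
        simpa using this
      simp [hz]
    · rw [show Nat.size (arr.length - 1) - 1 + 1 = Nat.size (arr.length - 1) from by omega]
  rw [hmin, fold_eq_sums]
  simp [verdict]

-- B computes the verdict of the full side sums
theorem alt_char (arr : List Int) (hne : arr ≠ []) :
    solution_alt arr
      = verdict (subSum arr (arr.length - 1) true) (subSum arr (arr.length - 1) false) := by
  unfold solution_alt
  rw [if_neg hne, fold_eq_sums]
  simp [verdict]

-- outside power-of-two lengths (and at n = 1) A's cutoff keeps every index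
theorem min_eq_full (n : Nat) (hn : 1 ≤ n) (h : ¬ (2 ≤ n ∧ n = 2 ^ Nat.size (n - 1))) :
    min (n - 1) (2 ^ Nat.size (n - 1) - 2) = n - 1 := by
  rcases Nat.lt_or_ge n 2 with h2 | h2
  · have hn1 : n = 1 := by omega
    subst hn1
    simp [Nat.size_zero]
  · have hlt := Nat.lt_size_self (n - 1)
    have hne : n ≠ 2 ^ Nat.size (n - 1) := fun he => h ⟨h2, he⟩
    omega

theorem sideSum_append (arr : List Int) (xs ys : List Nat) (s : Bool) :
    sideSum arr (xs ++ ys) s = sideSum arr xs s + sideSum arr ys s := by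
  simp [sideSum, List.filter_append]

theorem sideSum_single_zero (arr : List Int) (j : Nat) (s : Bool)
    (h : arr.getD j 0 = -1 ∨ arr.getD j 0 = 0) : sideSum arr [j] s = 0 := by
  unfold sideSum
  rcases h with h | h
  · rw [List.filter_cons,
      if_neg (by rw [bne_eq_false_iff_eq.mpr h, Bool.and_false]; exact Bool.false_ne_true),
      List.filter_nil, List.map_nil, List.sum_nil]
  · rw [List.filter_cons, List.filter_nil]
    by_cases hp : (isLeft j == s && (arr.getD j 0 != -1)) = true
    · rw [if_pos hp, List.map_cons, List.map_nil, List.sum_cons, List.sum_nil, h, add_zero]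
    · rw [if_neg hp, List.map_nil, List.sum_nil]

-- a last entry that is absent (-1) or zero does not move either side sum
theorem subSum_drop (arr : List Int) (m : Nat) (s : Bool)
    (h : arr.getD (m + 1) 0 = -1 ∨ arr.getD (m + 1) 0 = 0) :
    subSum arr (m + 1) s = subSum arr m s := by
  unfold subSum
  rw [List.range'_1_concat, Nat.add_comm 1 m, sideSum_append,
    sideSum_single_zero arr (m + 1) s h, add_zero]

-- ===== VERDICT (by name: the statement is the Claim_ definition above) =====
theorem solution_spec : Claim_unchanged_solution := by
  intro arr _
  unfold Spec_solution
  intro hnD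
  by_cases hne : arr = []
  · subst hne; rfl
  have hn : 1 ≤ arr.length := by
    cases arr with
    | nil => exact absurd rfl hne
    | cons x xs => simp
  rw [solution_char arr hne, alt_char arr hne]
  by_cases hp : 2 ≤ arr.length ∧ arr.length = 2 ^ Nat.size (arr.length - 1)
  · have hm : min (arr.length - 1) (2 ^ Nat.size (arr.length - 1) - 2) = arr.length - 2 := by
      omega
    have hlast : arr.getD (arr.length - 1) 0 = -1 ∨ arr.getD (arr.length - 1) 0 = 0 := by
      by_contra hc
      push Not at hc
      exact hnD ⟨hp.1, hp.2, hc.1, hc.2⟩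
    have h1 : arr.length - 1 = (arr.length - 2) + 1 := by omega
    rw [h1] at hlast
    rw [hm, h1, subSum_drop arr (arr.length - 2) true hlast,
      subSum_drop arr (arr.length - 2) false hlast]
  · rw [min_eq_full arr.length hn hp]

theorem solution_changed : Claim_changed_solution := by unfold Claim_changed_solution; decide
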